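-- pv_equiv track=rewrite | github.com/hadicangkring/akurat | app.py | build_transitions
-- ===== SOURCE A (Python) =====
-- def build_transitions(data, order=2):
--     transitions = {}
--     seqs = [list(x) for x in data]
--     for seq in seqs:
--         for i in range(len(seq) - order):
--             key = tuple(seq[i:i+order])
--             next_digit = seq[i+order]
--             transitions.setdefault(key, {})
--             transitions[key][next_digit] = transitions[key].get(next_digit, 0) + 1
--     return transitions
-- ===== SOURCE B (Python) =====
-- def build_transitions(data, order=2):
--     # Materialize the full stream of (prefix, next) occurrences, then build each
--     # row on first sight of its prefix by filtering the stream and counting --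
--     # no incremental counters are maintained at any point.
--     occ = [(tuple(s[i:i+order]), s[i+order])
--            for s in map(list, data)
--            for i in range(len(s) - order)]
--     transitions = {}
--     for key, _ in occ:
--         if key not in transitions:
--             nxts = [n for k, n in occ if k == key]
--             transitions[key] = {n: nxts.count(n) for n in nxts}
--     return transitions
-- ===== Notes on version B (the rewrite author's own statement) =====
-- stated objective: alternative
-- what changed: A maintains a nested dict of running counters incremented during a single scan; B keeps no counters at all: it materializes the flat list of (prefix, next) occurrences, then builds each prefix's row on first sight of that prefix by filtering the occurrence list and computing each value with list.count.
import Mathlib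
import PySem

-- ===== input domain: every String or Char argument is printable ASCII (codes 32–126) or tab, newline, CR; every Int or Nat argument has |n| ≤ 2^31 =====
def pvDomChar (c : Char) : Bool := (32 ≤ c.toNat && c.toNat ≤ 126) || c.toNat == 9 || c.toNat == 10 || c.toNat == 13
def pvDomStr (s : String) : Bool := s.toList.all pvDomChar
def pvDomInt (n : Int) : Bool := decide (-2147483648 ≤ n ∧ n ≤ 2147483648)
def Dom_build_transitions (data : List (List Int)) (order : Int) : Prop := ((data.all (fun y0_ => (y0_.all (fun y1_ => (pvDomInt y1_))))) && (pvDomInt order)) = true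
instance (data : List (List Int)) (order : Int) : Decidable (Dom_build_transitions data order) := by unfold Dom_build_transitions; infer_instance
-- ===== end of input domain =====

-- B keeps no running counters: it materializes the flat list of (prefix, next) occurrences and
-- builds each prefix's row on first sight of the prefix by filtering that list and counting
-- (objective: alternative algorithm, quadratic worst case instead of A's incremental counting).

-- ===== PORT A =====
-- Python dict assignment d[k] = v: overwrite in place if present, else append (shared dict helper).
def pvUpsert {α β : Type} [DecidableEq α] : List (α × β) → α → β → List (α × β)
  | [], k, v => [(k, v)]
  | (k', v') :: t, k, v => if k' = k then (k, v) :: t else (k', v') :: pvUpsert t k v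

-- Python d.get(k, dflt): first match or default (shared dict helper).
def pvLookupD {α β : Type} [DecidableEq α] : List (α × β) → α → β → β
  | [], _, d => d
  | (k', v') :: t, k, d => if k' = k then v' else pvLookupD t k d

def build_transitions (data : List (List Int)) (order : Int) : List (List Int × List (Int × Int)) :=
  -- seqs = [list(x) for x in data]
  (data.map (fun x => x)).foldl (fun transitions seq =>
    (PySem.List.pyRange 0 ((seq.length : Int) - order) 1).foldl (fun transitions i =>
      let key := PySem.List.slice seq (some i) (some (i + order))
      let next_digit := PySem.List.pyGetD seq (i + order) 0   -- in range under Pre_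
      -- transitions.setdefault(key, {}); transitions[key][next_digit] = ... .get(next_digit, 0) + 1
      let inner := pvLookupD transitions key []
      pvUpsert transitions key (pvUpsert inner next_digit (pvLookupD inner next_digit 0 + 1)))
      transitions) []

-- ===== PORT B =====
def build_transitions_alt (data : List (List Int)) (order : Int) : List (List Int × List (Int × Int)) :=
  -- occ = [(tuple(s[i:i+order]), s[i+order]) for s in map(list, data) for i in range(len(s)-order)]
  let occ : List (List Int × Int) := data.flatMap (fun s =>
    (PySem.List.pyRange 0 ((s.length : Int) - order) 1).map (fun i =>
      (PySem.List.slice s (some i) (some (i + order)), PySem.List.pyGetD s (i + order) 0)))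
  -- for key, _ in occ: if key not in transitions: build its row by filtering occ and counting
  occ.foldl (fun transitions p =>
    if p.1 ∈ transitions.map Prod.fst then transitions
    else
      let nxts := (occ.filter (fun q => q.1 = p.1)).map Prod.snd
      -- {n: nxts.count(n) for n in nxts}: every write for n stores the same total count
      transitions ++ [(p.1, nxts.foldl (fun inner n => pvUpsert inner n ((nxts.count n : Nat) : Int)) [])])
    []

-- ===== PRECONDITION & SPEC =====
-- Pre_ excludes exactly the inputs where Python A raises IndexError: a negative order smaller
-- than -len(seq) for some sequence makes seq[i+order] an out-of-range negative index.
def Pre_build_transitions (data : List (List Int)) (order : Int) : Prop :=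
  ∀ s ∈ data, -(s.length : Int) ≤ order
instance (data : List (List Int)) (order : Int) : Decidable (Pre_build_transitions data order) := by
  unfold Pre_build_transitions; infer_instance
def pvWitness_build_transitions : List (List Int) × Int := ([[1, 2, 3, 1, 2], [2, 1, 2]], 2)

def Spec_build_transitions (data : List (List Int)) (order : Int) (out : List (List Int × List (Int × Int))) : Prop := out = build_transitions_alt data order
instance (data : List (List Int)) (order : Int) (out : List (List Int × List (Int × Int))) : Decidable (Spec_build_transitions data order out) := by unfold Spec_build_transitions; infer_instance

-- ===== CLAIM (what is proved, stated in full; the proofs are below) =====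
def Claim_equal_build_transitions : Prop := ∀ (data : List (List Int)) (order : Int), Dom_build_transitions data order → Pre_build_transitions data order → Spec_build_transitions data order (build_transitions data order)

-- ===== LEMMAS AND PROOFS =====

-- the stream of (prefix, next) occurrence pairs, and the fold steps of the two ports
def pvPair (seq : List Int) (order : Int) (i : Int) : List Int × Int :=
  (PySem.List.slice seq (some i) (some (i + order)), PySem.List.pyGetD seq (i + order) 0)

def pvPairs (data : List (List Int)) (order : Int) : List (List Int × Int) :=
  data.flatMap (fun seq => (PySem.List.pyRange 0 ((seq.length : Int) - order) 1).map (pvPair seq order))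

def pvStepA (T : List (List Int × List (Int × Int))) (p : List Int × Int) : List (List Int × List (Int × Int)) :=
  pvUpsert T p.1 (pvUpsert (pvLookupD T p.1 []) p.2 (pvLookupD (pvLookupD T p.1 []) p.2 0 + 1))

-- B's row for one prefix: filter the occurrence stream, then count
def pvInnerB (occ : List (List Int × Int)) (k : List Int) : List (Int × Int) :=
  ((occ.filter (fun q => q.1 = k)).map Prod.snd).foldl
    (fun inner n => pvUpsert inner n
      (((((occ.filter (fun q => q.1 = k)).map Prod.snd).count n : Nat) : Int))) []

def pvStepB (occ : List (List Int × Int)) (T : List (List Int × List (Int × Int)))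
    (p : List Int × Int) : List (List Int × List (Int × Int)) :=
  if p.1 ∈ T.map Prod.fst then T else T ++ [(p.1, pvInnerB occ p.1)]

-- first match as an option
def pvLookup? {α β : Type} [DecidableEq α] : List (α × β) → α → Option β
  | [], _ => none
  | (k', v') :: t, k => if k' = k then some v' else pvLookup? t k

-- first-occurrence dedup relative to a "seen" list
def pvFo {α : Type} [DecidableEq α] : List α → List α → List α
  | _, [] => []
  | s, x :: t => if x ∈ s then pvFo s t else x :: pvFo (x :: s) t

theorem pvLookupD_upsert_self {α β : Type} [DecidableEq α] (l : List (α × β)) (k : α) (v d : β) :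
    pvLookupD (pvUpsert l k v) k d = v := by
  induction l with
  | nil => simp [pvUpsert, pvLookupD]
  | cons h t ih =>
    obtain ⟨k', v'⟩ := h
    by_cases hk : k' = k <;> simp [pvUpsert, pvLookupD, hk, ih]

theorem pvLookupD_upsert_ne {α β : Type} [DecidableEq α] (l : List (α × β)) (k k' : α) (v : β) (d : β)
    (h : k' ≠ k) : pvLookupD (pvUpsert l k v) k' d = pvLookupD l k' d := by
  induction l with
  | nil =>
    simp only [pvUpsert, pvLookupD]
    rw [if_neg (fun h' : k = k' => h h'.symm)]
  | cons hd t ih =>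
    obtain ⟨k₀, v₀⟩ := hd
    by_cases hk : k₀ = k
    · subst hk
      have hne : ¬ (k₀ = k') := fun h' => h h'.symm
      simp [pvUpsert, pvLookupD, hne]
    · simp only [pvUpsert, if_neg hk, pvLookupD]
      by_cases hk' : k₀ = k'
      · simp [hk']
      · simp [hk', ih]

theorem map_fst_upsert {α β : Type} [DecidableEq α] (l : List (α × β)) (k : α) (v : β) :
    (pvUpsert l k v).map Prod.fst =
      if k ∈ l.map Prod.fst then l.map Prod.fst else l.map Prod.fst ++ [k] := by
  induction l with
  | nil => simp [pvUpsert]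
  | cons hd t ih =>
    obtain ⟨k₀, v₀⟩ := hd
    by_cases hk : k₀ = k
    · simp [pvUpsert, hk]
    · by_cases hmem : k ∈ t.map Prod.fst <;>
        simp [pvUpsert, hk, ih, hmem, Ne.symm hk]

theorem pvLookup?_eq_some {α β : Type} [DecidableEq α] (l : List (α × β)) (k : α) (d : β)
    (h : k ∈ l.map Prod.fst) : pvLookup? l k = some (pvLookupD l k d) := by
  induction l with
  | nil => simp at h
  | cons hd t ih =>
    obtain ⟨k₀, v₀⟩ := hd
    by_cases hk : k₀ = k
    · simp [pvLookup?, pvLookupD, hk]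
    · simp only [List.map_cons, List.mem_cons] at h
      rcases h with h | h
      · exact absurd h.symm hk
      · simp [pvLookup?, pvLookupD, hk, ih h]

theorem pvLookup?_eq_none {α β : Type} [DecidableEq α] (l : List (α × β)) (k : α)
    (h : k ∉ l.map Prod.fst) : pvLookup? l k = none := by
  induction l with
  | nil => rfl
  | cons hd t ih =>
    obtain ⟨k₀, v₀⟩ := hd
    simp only [List.map_cons, List.mem_cons] at h
    push_neg at h
    simp only [pvLookup?]
    rw [if_neg (fun h' : k₀ = k => h.1 h'.symm)]
    exact ih h.2

-- assoc lists with the same nodup key sequence and the same first-match lookups are equal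
theorem pvExt {α β : Type} [DecidableEq α] (l₁ l₂ : List (α × β))
    (h1 : l₁.map Prod.fst = l₂.map Prod.fst) (h2 : (l₁.map Prod.fst).Nodup)
    (h3 : ∀ k, pvLookup? l₁ k = pvLookup? l₂ k) : l₁ = l₂ := by
  induction l₁ generalizing l₂ with
  | nil => cases l₂ <;> simp_all
  | cons hd t ih =>
    obtain ⟨k₁, v₁⟩ := hd
    cases l₂ with
    | nil => simp at h1
    | cons hd₂ t₂ =>
      obtain ⟨k₂, v₂⟩ := hd₂
      simp only [List.map_cons, List.cons.injEq] at h1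
      obtain ⟨hkk, hts⟩ := h1
      subst hkk
      obtain rfl : v₁ = v₂ := by simpa [pvLookup?] using h3 k₁
      simp only [List.map_cons, List.nodup_cons] at h2
      have ht : t = t₂ := by
        refine ih t₂ hts h2.2 ?_
        intro k
        by_cases hk : k = k₁
        · subst hk
          rw [pvLookup?_eq_none t k h2.1, pvLookup?_eq_none t₂ k (hts ▸ h2.1)]
        · have hne : ¬ (k₁ = k) := fun h' => hk h'.symm
          simpa [pvLookup?, hne] using h3 k
      rw [ht]

theorem mem_pvFo {α : Type} [DecidableEq α] (l s : List α) (x : α) :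
    x ∈ pvFo s l ↔ x ∈ l ∧ x ∉ s := by
  induction l generalizing s with
  | nil => simp [pvFo]
  | cons y t ih =>
    by_cases hy : y ∈ s
    · simp only [pvFo, if_pos hy, ih]
      constructor
      · rintro ⟨h1, h2⟩; exact ⟨.tail _ h1, h2⟩
      · rintro ⟨h1, h2⟩
        rcases List.mem_cons.mp h1 with rfl | h1
        · exact absurd hy h2
        · exact ⟨h1, h2⟩
    · simp only [pvFo, if_neg hy, List.mem_cons, ih, List.mem_cons]
      constructor
      · rintro (rfl | ⟨h1, h2⟩)
        · exact ⟨Or.inl rfl, hy⟩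
        · push_neg at h2; exact ⟨Or.inr h1, h2.2⟩
      · rintro ⟨rfl | h1, h2⟩
        · exact Or.inl rfl
        · by_cases hx : x = y
          · exact Or.inl hx
          · exact Or.inr ⟨h1, by simp [hx, h2]⟩

theorem nodup_pvFo {α : Type} [DecidableEq α] (l s : List α) : (pvFo s l).Nodup := by
  induction l generalizing s with
  | nil => simp [pvFo]
  | cons y t ih =>
    by_cases hy : y ∈ s
    · simpa [pvFo, hy] using ih s
    · simp only [pvFo, if_neg hy, List.nodup_cons]
      refine ⟨fun hmem => ?_, ih _⟩
      exact ((mem_pvFo t (y :: s) y).mp hmem).2 (List.mem_cons_self ..)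

theorem pvFo_congr {α : Type} [DecidableEq α] (l s s' : List α)
    (h : ∀ y ∈ l, (y ∈ s ↔ y ∈ s')) : pvFo s l = pvFo s' l := by
  induction l generalizing s s' with
  | nil => rfl
  | cons y t ih =>
    have hy := h y (List.mem_cons_self ..)
    by_cases hys : y ∈ s
    · simp only [pvFo, if_pos hys, if_pos (hy.mp hys)]
      exact ih s s' (fun z hz => h z (.tail _ hz))
    · simp only [pvFo, if_neg hys, if_neg (fun h' => hys (hy.mpr h'))]
      refine congrArg _ (ih (y :: s) (y :: s') ?_)
      intro z hz
      simp [h z (.tail _ hz)]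

-- key sequence of any fold whose step is an upsert at (key p)
theorem map_fst_foldl_upsert {κ ν α : Type} [DecidableEq κ] (key : α → κ)
    (valf : List (κ × ν) → α → ν) (l : List α) (T : List (κ × ν)) :
    (l.foldl (fun s p => pvUpsert s (key p) (valf s p)) T).map Prod.fst =
      T.map Prod.fst ++ pvFo (T.map Prod.fst) (l.map key) := by
  induction l generalizing T with
  | nil => simp [pvFo]
  | cons p t ih =>
    simp only [List.foldl_cons, List.map_cons]
    rw [ih]
    rw [map_fst_upsert]
    by_cases hk : key p ∈ T.map Prod.fst
    · simp [hk, pvFo]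
    · simp only [if_neg hk, pvFo, if_neg hk]
      rw [List.append_assoc]
      refine congrArg _ ?_
      simp only [List.singleton_append]
      refine congrArg _ (pvFo_congr _ _ _ ?_)
      intro y _
      simp [or_comm]

-- inner key sequence at outer key k, for steps that upsert (aux p) into the inner list at (key p)
theorem inner_map_fst_foldl {κ ι ν α : Type} [DecidableEq κ] [DecidableEq ι] (key : α → κ)
    (aux : α → ι) (ivalf : List (κ × List (ι × ν)) → α → ν) (l : List α)
    (T : List (κ × List (ι × ν))) (k : κ) :
    (pvLookupD (l.foldl (fun s p =>
        pvUpsert s (key p) (pvUpsert (pvLookupD s (key p) []) (aux p) (ivalf s p))) T) k []).map Prod.fst =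
      (pvLookupD T k []).map Prod.fst ++
        pvFo ((pvLookupD T k []).map Prod.fst) ((l.filter (fun p => decide (key p = k))).map aux) := by
  induction l generalizing T with
  | nil => simp [pvFo]
  | cons p t ih =>
    simp only [List.foldl_cons]
    rw [ih]
    by_cases hk : key p = k
    · rw [hk, pvLookupD_upsert_self, map_fst_upsert]
      have hfc : (p :: t).filter (fun q => decide (key q = k)) =
          p :: t.filter (fun q => decide (key q = k)) := by
        simp [List.filter_cons, hk]
      rw [hfc, List.map_cons]
      by_cases hmem : aux p ∈ (pvLookupD T k []).map Prod.fst
      · rw [if_pos hmem]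
        simp only [pvFo, if_pos hmem]
      · rw [if_neg hmem]
        simp only [pvFo, if_neg hmem]
        rw [List.append_assoc, List.singleton_append]
        refine congrArg _ (congrArg _ (pvFo_congr ((t.filter (fun q => decide (key q = k))).map aux)
          ((pvLookupD T k []).map Prod.fst ++ [aux p])
          (aux p :: (pvLookupD T k []).map Prod.fst) ?_))
        intro y _
        simp [or_comm]
    · rw [pvLookupD_upsert_ne (k := key p) (k' := k) _ _ _ (fun h => hk h.symm)]
      simp [List.filter_cons, hk]

-- A-side inner value: a running (k, n) counter
theorem stepA_value (ps : List (List Int × Int)) (T : List (List Int × List (Int × Int)))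
    (k : List Int) (n : Int) :
    pvLookupD (pvLookupD (ps.foldl pvStepA T) k []) n 0 =
      pvLookupD (pvLookupD T k []) n 0 + (ps.count (k, n) : Int) := by
  induction ps generalizing T with
  | nil => simp
  | cons p t ih =>
    simp only [List.foldl_cons, List.count_cons]
    rw [ih]
    by_cases h1 : p.1 = k
    · by_cases h2 : p.2 = n
      · have hp : p = (k, n) := Prod.ext h1 h2
        simp only [pvStepA, hp, pvLookupD_upsert_self]
        simp
        omega
      · have hp : p ≠ (k, n) := fun h => h2 (by rw [h])
        simp only [pvStepA, h1, pvLookupD_upsert_self]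
        rw [pvLookupD_upsert_ne _ _ _ _ _ (fun h : n = p.2 => h2 h.symm)]
        simp [hp]
    · have hp : p ≠ (k, n) := fun h => h1 (by rw [h])
      simp only [pvStepA]
      rw [pvLookupD_upsert_ne _ _ _ _ _ (fun h : k = p.1 => h1 h.symm)]
      simp [hp]

-- B-side row value: all writes for n store the same constant, so lookup = that constant
theorem lookupD_foldl_const (g : Int → Int) (l : List Int) (init : List (Int × Int)) (m d : Int) :
    pvLookupD (l.foldl (fun inner n => pvUpsert inner n (g n)) init) m d =
      if m ∈ l then g m else pvLookupD init m d := by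
  induction l generalizing init with
  | nil => simp
  | cons n t ih =>
    simp only [List.foldl_cons]
    rw [ih]
    by_cases hm : m ∈ t
    · simp [hm]
    · by_cases hn : n = m
      · subst hn
        simp [hm, pvLookupD_upsert_self]
      · rw [pvLookupD_upsert_ne _ _ _ _ _ (fun h : m = n => hn h.symm)]
        simp [hm]
        exact fun h => absurd h.symm hn

-- B's fold over the occurrence stream appends one finished row per first-seen prefix
theorem foldB_eq (occ ps : List (List Int × Int)) (T : List (List Int × List (Int × Int))) :
    ps.foldl (pvStepB occ) T =
      T ++ (pvFo (T.map Prod.fst) (ps.map Prod.fst)).map (fun k => (k, pvInnerB occ k)) := by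
  induction ps generalizing T with
  | nil => simp [pvFo]
  | cons p t ih =>
    simp only [List.foldl_cons, List.map_cons]
    by_cases hmem : p.1 ∈ T.map Prod.fst
    · rw [show pvStepB occ T p = T from if_pos hmem, ih]
      simp only [pvFo, if_pos hmem]
    · rw [show pvStepB occ T p = T ++ [(p.1, pvInnerB occ p.1)] from if_neg hmem, ih]
      simp only [pvFo, if_neg hmem]
      have hkeys : (T ++ [(p.1, pvInnerB occ p.1)]).map Prod.fst = T.map Prod.fst ++ [p.1] := by
        simp
      rw [hkeys]
      rw [pvFo_congr (t.map Prod.fst) (T.map Prod.fst ++ [p.1]) (p.1 :: T.map Prod.fst)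
        (by intro y _; simp [or_comm])]
      simp

-- lookup in a row list built by mapping over the (nodup) key list
theorem pvLookup?_mapped (l : List (List Int)) (f : List Int → List (Int × Int)) (k : List Int) :
    pvLookup? (l.map (fun k => (k, f k))) k = if k ∈ l then some (f k) else none := by
  induction l with
  | nil => simp [pvLookup?]
  | cons y t ih =>
    by_cases hy : y = k
    · subst hy; simp [pvLookup?]
    · have hky : ¬ k = y := fun h => hy h.symm
      simp [pvLookup?, hy, ih, hky]

-- counting a pair in the stream = counting its next-symbol in the filtered row stream
theorem count_pair_filter (ps : List (List Int × Int)) (k : List Int) (n : Int) :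
    ps.count (k, n) = ((ps.filter (fun q => decide (q.1 = k))).map Prod.snd).count n := by
  induction ps with
  | nil => simp
  | cons p t ih =>
    rw [List.count_cons]
    by_cases h1 : p.1 = k
    · rw [List.filter_cons_of_pos (by simp [h1]), List.map_cons, List.count_cons, ih]
      by_cases h2 : p.2 = n
      · have : p = (k, n) := Prod.ext h1 h2
        simp [this, h2]
      · have : ¬ (p = (k, n)) := fun h => h2 (by rw [h])
        simp [this, h2]
    · rw [List.filter_cons_of_neg (by simp [h1]), ih]
      have : ¬ (p = (k, n)) := fun h => h1 (by rw [h])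
      simp [this]

-- a nested double fold is a fold over the flattened stream
theorem foldl_foldl {σ α β : Type} (g : σ → α → σ) (F : β → List α) (bs : List β) (init : σ) :
    bs.foldl (fun s b => (F b).foldl g s) init = (bs.flatMap F).foldl g init := by
  induction bs generalizing init with
  | nil => rfl
  | cons b t ih => simp [List.flatMap_cons, List.foldl_append, ih]

theorem build_transitions_eq (data : List (List Int)) (order : Int) :
    build_transitions data order = (pvPairs data order).foldl pvStepA [] := by
  unfold build_transitions pvPairs
  rw [List.map_id']
  rw [← foldl_foldl pvStepA (fun seq => (PySem.List.pyRange 0 ((seq.length : Int) - order) 1).map (pvPair seq order)) data []]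
  have hf : (fun (s : List (List Int × List (Int × Int))) (seq : List Int) =>
      ((PySem.List.pyRange 0 ((seq.length : Int) - order) 1).map (pvPair seq order)).foldl pvStepA s) =
      fun s seq => (PySem.List.pyRange 0 ((seq.length : Int) - order) 1).foldl
        (fun s i => pvStepA s (pvPair seq order i)) s := by
    funext s seq
    rw [List.foldl_map]
  rw [hf]
  rfl

theorem build_transitions_alt_eq (data : List (List Int)) (order : Int) :
    build_transitions_alt data order = (pvPairs data order).foldl (pvStepB (pvPairs data order)) [] := by
  rfl

theorem stepA_shape : pvStepA = fun (s : List (List Int × List (Int × Int))) (p : List Int × Int) =>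
    pvUpsert s (Prod.fst p)
      (pvUpsert (pvLookupD s (Prod.fst p) []) (p.2) (pvLookupD (pvLookupD s (Prod.fst p) []) p.2 0 + 1)) := rfl

theorem keysA (ps : List (List Int × Int)) :
    ((ps.foldl pvStepA []).map Prod.fst) = pvFo [] (ps.map Prod.fst) := by
  rw [stepA_shape]
  rw [map_fst_foldl_upsert Prod.fst _ ps []]
  simp

theorem innerKeysA (ps : List (List Int × Int)) (k : List Int) :
    (pvLookupD (ps.foldl pvStepA []) k []).map Prod.fst =
      pvFo [] ((ps.filter (fun p => decide (p.1 = k))).map Prod.snd) := by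
  rw [stepA_shape]
  rw [inner_map_fst_foldl Prod.fst Prod.snd _ ps [] k]
  simp [pvLookupD]

-- keys of B's row for prefix k: first occurrences of the filtered next-symbol stream
-- keys of a constant-value upsert fold over a plain list
theorem map_fst_foldl_upsert_id (g : Int → Int) (l : List Int) :
    ((l.foldl (fun inner n => pvUpsert inner n (g n)) []).map Prod.fst) = pvFo [] l := by
  have h := map_fst_foldl_upsert (id : Int → Int) (fun _ p => g p) l []
  simpa [id] using h

theorem innerKeysB (occ : List (List Int × Int)) (k : List Int) :
    (pvInnerB occ k).map Prod.fst =
      pvFo [] (((occ.filter (fun q => decide (q.1 = k))).map Prod.snd)) := by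
  unfold pvInnerB
  exact map_fst_foldl_upsert_id _ _

theorem main_eq (ps : List (List Int × Int)) :
    ps.foldl pvStepA [] = ps.foldl (pvStepB ps) [] := by
  rw [foldB_eq ps ps []]
  simp only [List.map_nil, List.nil_append]
  have hkeysA := keysA ps
  have hkeysB : ((pvFo ([] : List (List Int)) (ps.map Prod.fst)).map
      (fun k => (k, pvInnerB ps k))).map Prod.fst = pvFo [] (ps.map Prod.fst) := by
    rw [List.map_map]; simp [Function.comp_def]
  refine pvExt _ _ (hkeysA.trans hkeysB.symm) (by rw [hkeysA]; exact nodup_pvFo _ _) ?_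
  intro k
  by_cases hk : k ∈ pvFo ([] : List (List Int)) (ps.map Prod.fst)
  · rw [pvLookup?_eq_some _ k [] (by rw [hkeysA]; exact hk),
        pvLookup?_mapped _ _ k, if_pos hk]
    refine congrArg _ ?_
    -- the two rows for prefix k agree
    have hik : (pvLookupD (ps.foldl pvStepA []) k []).map Prod.fst = (pvInnerB ps k).map Prod.fst := by
      rw [innerKeysA, innerKeysB]
    refine pvExt _ _ hik (by rw [innerKeysA]; exact nodup_pvFo _ _) ?_
    intro n
    by_cases hn : n ∈ (pvLookupD (ps.foldl pvStepA []) k []).map Prod.fst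
    · rw [pvLookup?_eq_some _ n 0 hn, pvLookup?_eq_some _ n 0 (hik ▸ hn)]
      refine congrArg _ ?_
      rw [stepA_value ps [] k n]
      have hnmem : n ∈ (ps.filter (fun q => decide (q.1 = k))).map Prod.snd := by
        rw [innerKeysA] at hn
        exact ((mem_pvFo _ _ _).mp hn).1
      unfold pvInnerB
      rw [lookupD_foldl_const, if_pos hnmem]
      rw [count_pair_filter]
      simp [pvLookupD]
    · rw [pvLookup?_eq_none _ n hn, pvLookup?_eq_none _ n (hik ▸ hn)]
  · rw [pvLookup?_eq_none _ k (by rw [hkeysA]; exact hk), pvLookup?_mapped _ _ k, if_neg hk]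

-- ===== VERDICT (by name: the statement is the Claim_ definition above) =====
theorem build_transitions_spec : Claim_equal_build_transitions := by
  intro data order _hdom _hpre
  unfold Spec_build_transitions
  rw [build_transitions_eq, build_transitions_alt_eq, main_eq]
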